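-- pv_equiv track=rewrite | github.com/songzy12/TopCoder-SRM | 847/GivenDigitSum.py | construct_num_array
-- ===== SOURCE A (Python) =====
-- def construct_num_array(D, S):
--     if S >= 9 * D:
--         return []
--     res = [0 for i in range(D)]
--     index = len(res) - 1
--     while S:
--         if S > 9:
--             res[index] = 9
--             S -= 9
--             index -= 1
--         else:
--             res[index] = S
--             break
--     return res
-- ===== SOURCE B (Python) =====
-- def construct_num_array(D, S):
--     if S >= 9 * D:
--         return []
--     if S <= 0:
--         return [0] * (D - 1) + [S]
--     q, r = divmod(S - 1, 9)
--     return [0] * (D - 1 - q) + [r + 1] + [9] * q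
-- ===== Notes on version B (the rewrite author's own statement) =====
-- stated objective: simpler
-- what changed: Replaces the repeated-subtraction while loop and per-element list construction with closed-form divmod arithmetic and bulk list fills ([0]*k + [digit] + [9]*q).
import Mathlib
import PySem

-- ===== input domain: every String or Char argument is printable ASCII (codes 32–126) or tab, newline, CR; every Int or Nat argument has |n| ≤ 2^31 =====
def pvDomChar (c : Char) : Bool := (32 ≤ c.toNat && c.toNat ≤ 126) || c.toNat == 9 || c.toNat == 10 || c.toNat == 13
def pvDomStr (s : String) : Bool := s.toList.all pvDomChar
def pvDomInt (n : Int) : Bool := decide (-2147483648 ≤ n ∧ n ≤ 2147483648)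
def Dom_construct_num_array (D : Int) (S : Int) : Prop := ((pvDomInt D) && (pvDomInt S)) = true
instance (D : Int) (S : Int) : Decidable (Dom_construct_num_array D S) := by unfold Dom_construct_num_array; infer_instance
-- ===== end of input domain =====

-- B replaces A's repeated-subtraction loop with closed-form divmod arithmetic and bulk fills (objective: simpler).

-- ===== PORT A =====
-- Python 'res[index] = v' with a possibly negative index (Python wraps negative indices;
-- out-of-range raises IndexError — unreachable inside Pre_, where we return the list unchanged).
def pySetA (xs : List Int) (i v : Int) : List Int :=
  let j : Int := if i < 0 then i + xs.length else i
  if 0 ≤ j ∧ j < xs.length then xs.set j.toNat v else xs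

-- the 'while S:' loop of A
def aLoop (res : List Int) (S : Int) (index : Int) : List Int :=
  if S ≠ 0 then
    if S > 9 then aLoop (pySetA res index 9) (S - 9) (index - 1)
    else pySetA res index S
  else res
termination_by S.toNat
decreasing_by omega

def construct_num_array (D : Int) (S : Int) : List Int :=
  if S ≥ 9 * D then []
  else
    let res := (PySem.List.pyRange 0 D 1).map (fun _ => (0 : Int))
    aLoop res S ((res.length : Int) - 1)

-- ===== PORT B =====
def construct_num_array_alt (D : Int) (S : Int) : List Int :=
  if S ≥ 9 * D then []
  else if S ≤ 0 then PySem.List.pyRepeat [(0 : Int)] (D - 1) ++ [S]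
  else
    let q := PySem.Int.floordiv (S - 1) 9
    let r := PySem.Int.mod (S - 1) 9
    PySem.List.pyRepeat [(0 : Int)] (D - 1 - q) ++ [r + 1] ++ PySem.List.pyRepeat [(9 : Int)] q

-- ===== PRECONDITION & SPEC =====
-- Pre_ excludes exactly the inputs where A raises IndexError (res[-1] on the empty list): D ≤ 0 with S < 9*D.
def Pre_construct_num_array (D : Int) (S : Int) : Prop := ¬ (D ≤ 0 ∧ S < 9 * D)
instance (D : Int) (S : Int) : Decidable (Pre_construct_num_array D S) := by unfold Pre_construct_num_array; infer_instance
def pvWitness_construct_num_array : Int × Int := (3, 14)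

def Spec_construct_num_array (D : Int) (S : Int) (out : List Int) : Prop := out = construct_num_array_alt D S
instance (D : Int) (S : Int) (out : List Int) : Decidable (Spec_construct_num_array D S out) := by unfold Spec_construct_num_array; infer_instance

-- ===== CLAIM (what is proved, stated in full; the proofs are below) =====
def Claim_equal_construct_num_array : Prop := ∀ (D : Int) (S : Int), Dom_construct_num_array D S → Pre_construct_num_array D S → Spec_construct_num_array D S (construct_num_array D S)

-- ===== LEMMAS AND PROOFS =====

-- setting the last zero of the zero-prefix
lemma pySetA_replicate_append (n : Nat) (l : List Int) (v : Int) (hn : 1 ≤ n) :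
    pySetA (List.replicate n (0 : Int) ++ l) ((n : Int) - 1) v
      = List.replicate (n - 1) (0 : Int) ++ [v] ++ l := by
  unfold pySetA
  have hlen : (List.replicate n (0 : Int) ++ l).length = n + l.length := by simp
  have h1 : ¬ ((n : Int) - 1 < 0) := by omega
  simp only [h1, if_false, hlen]
  have h2 : (0 : Int) ≤ (n : Int) - 1 ∧ (n : Int) - 1 < ((n + l.length : Nat) : Int) := by
    constructor <;> omega
  rw [if_pos (by push_cast; omega)]
  have ht : ((n : Int) - 1).toNat = n - 1 := by omega
  rw [ht]
  have hrep : List.replicate n (0 : Int) = List.replicate (n - 1) (0 : Int) ++ [0] := by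
    rw [← List.replicate_succ']
    congr 1
    omega
  rw [hrep, List.append_assoc, List.set_append]
  have hlt : ¬ (n - 1 < (List.replicate (n - 1) (0 : Int)).length) := by simp
  rw [if_neg hlt]
  simp

lemma aLoop_char (k : Nat) : ∀ (n m : Nat) (S : Int), 0 < S → S ≤ 9 * n → k = ((S - 1) / 9).toNat →
    aLoop (List.replicate n (0 : Int) ++ List.replicate m (9 : Int)) S ((n : Int) - 1)
      = List.replicate (n - 1 - k) (0 : Int) ++ [(S - 1) % 9 + 1] ++ List.replicate (k + m) (9 : Int) := by
  induction k with
  | zero =>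
    intro n m S hS hSn hk
    have hS9 : S ≤ 9 := by omega
    have hn1 : 1 ≤ n := by
      by_contra h
      omega
    rw [aLoop]
    rw [if_pos (by omega), if_neg (by omega)]
    rw [pySetA_replicate_append n _ S hn1]
    have : (S - 1) % 9 + 1 = S := by omega
    rw [this]
    simp
  | succ k ih =>
    intro n m S hS hSn hk
    have hS10 : 10 ≤ S := by omega
    have hn2 : 2 ≤ n := by omega
    rw [aLoop]
    rw [if_pos (by omega), if_pos (by omega)]
    rw [pySetA_replicate_append n _ 9 (by omega)]
    have hmerge : List.replicate (n - 1) (0 : Int) ++ [9] ++ List.replicate m (9 : Int)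
        = List.replicate (n - 1) (0 : Int) ++ List.replicate (m + 1) (9 : Int) := by
      simp [List.replicate_succ]
    rw [hmerge]
    have hidx : (n : Int) - 1 - 1 = ((n - 1 : Nat) : Int) - 1 := by omega
    rw [hidx, ih (n - 1) (m + 1) (S - 9) (by omega) (by omega) (by omega)]
    have h1 : n - 1 - 1 - k = n - 1 - (k + 1) := by omega
    have h2 : (S - 9 - 1) % 9 = (S - 1) % 9 := by omega
    have h3 : k + (m + 1) = k + 1 + m := by omega
    rw [h1, h2, h3]

lemma pyRange_map_zero (D : Int) :
    (PySem.List.pyRange 0 D 1).map (fun _ => (0 : Int)) = List.replicate D.toNat (0 : Int) := by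
  rw [PySem.List.pyRange_one]
  have : (D - 0).toNat = D.toNat := by omega
  rw [this]
  simp [List.map_map, List.eq_replicate_iff]

lemma pyRepeat_zero (n : Int) :
    PySem.List.pyRepeat [(0 : Int)] n = List.replicate n.toNat (0 : Int) :=
  PySem.List.pyRepeat_singleton 0 n

-- ===== VERDICT (by name: the statement is the Claim_ definition above) =====
theorem construct_num_array_spec : Claim_equal_construct_num_array := by
  intro D S _ hPre
  unfold Spec_construct_num_array construct_num_array construct_num_array_alt
  by_cases hbig : S ≥ 9 * D
  · rw [if_pos hbig, if_pos hbig]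
  · rw [if_neg hbig, if_neg hbig]
    have hD1 : 1 ≤ D := by
      unfold Pre_construct_num_array at hPre
      omega
    simp only [pyRange_map_zero, List.length_replicate, pyRepeat_zero]
    by_cases hSle : S ≤ 0
    · rw [if_pos hSle]
      by_cases hS0 : S = 0
      · subst hS0
        rw [aLoop]
        simp only [ne_eq, not_true_eq_false, if_false]
        have : List.replicate D.toNat (0 : Int) = List.replicate (D - 1).toNat (0 : Int) ++ [0] := by
          rw [← List.replicate_succ']
          congr 1
          omega
        exact this
      · rw [aLoop]
        rw [if_pos (by omega), if_neg (by omega)]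
        have := pySetA_replicate_append D.toNat [] S (by omega)
        simp only [List.append_nil] at this
        rw [this]
        congr 2
        omega
    · rw [if_neg hSle]
      have hSpos : 0 < S := by omega
      have hfd : PySem.Int.floordiv (S - 1) 9 = (S - 1) / 9 := by
        rw [PySem.Int.floordiv_eq_ediv_of_pos]; omega
      have hmd : PySem.Int.mod (S - 1) 9 = (S - 1) % 9 := by
        rw [PySem.Int.mod_eq_emod_of_pos]; omega
      have hq0 : 0 ≤ (S - 1) / 9 := by omega
      have hmain := aLoop_char ((S - 1) / 9).toNat D.toNat 0 S hSpos (by omega) rfl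
      simp only [List.replicate_zero, List.append_nil, Nat.add_zero] at hmain
      rw [hmain, hfd, hmd, PySem.List.pyRepeat_singleton]
      have e1 : D.toNat - 1 - ((S - 1) / 9).toNat = (D - 1 - (S - 1) / 9).toNat := by omega
      rw [e1]
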